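-- pv_equiv track=rewrite | github.com/Archisman-Mridha/porth | lexer.py | lexLine
-- ===== SOURCE A (Python) =====
-- def findStartingColumnNumberAfterPredicate(line, startingPosition, isCharacterPredicate):
--     currentPosition= startingPosition
--
--     while currentPosition < len(line) and not isCharacterPredicate(line[currentPosition]):
--         currentPosition += 1
--
--     return currentPosition
--
-- def lexLine(line):
--     # ignore whitespaces in the beginning of the line
--     wordStartingPosition= findStartingColumnNumberAfterPredicate(line, 0,
--                                                                     lambda character: not character.isspace( ))
--
--     while wordStartingPosition < len(line):
--
--         # find position of the next whitespace
--         nextWhitespaceStartingPosition= findStartingColumnNumberAfterPredicate(line, wordStartingPosition,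
--                                                                                 lambda character: character.isspace( ))
--
--         word= line[wordStartingPosition:nextWhitespaceStartingPosition]
--         yield (wordStartingPosition, word)
--
--         wordStartingPosition= findStartingColumnNumberAfterPredicate(line, nextWhitespaceStartingPosition,
--                                                                         lambda character: not character.isspace( ))
-- ===== SOURCE B (Python) =====
-- def lexLine(line):
--     # single forward pass: track the start of the current word and accumulate
--     # its characters; flush on whitespace and once more at end of line
--     start = None
--     buf = []
--     for i, ch in enumerate(line):
--         if ch.isspace():
--             if start is not None:
--                 yield (start, ''.join(buf))
--                 start = None
--                 buf = []
--         else: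
--             if start is None:
--                 start = i
--                 buf = [ch]
--             else:
--                 buf.append(ch)
--     if start is not None:
--         yield (start, ''.join(buf))
-- ===== Notes on version B (the rewrite author's own statement) =====
-- stated objective: simpler
-- what changed: Replaced the double scan (a skip-whitespace helper called twice per word, then a slice) by one forward pass that tracks the current word's start and accumulates its characters, dropping the helper entirely.
import Mathlib
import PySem

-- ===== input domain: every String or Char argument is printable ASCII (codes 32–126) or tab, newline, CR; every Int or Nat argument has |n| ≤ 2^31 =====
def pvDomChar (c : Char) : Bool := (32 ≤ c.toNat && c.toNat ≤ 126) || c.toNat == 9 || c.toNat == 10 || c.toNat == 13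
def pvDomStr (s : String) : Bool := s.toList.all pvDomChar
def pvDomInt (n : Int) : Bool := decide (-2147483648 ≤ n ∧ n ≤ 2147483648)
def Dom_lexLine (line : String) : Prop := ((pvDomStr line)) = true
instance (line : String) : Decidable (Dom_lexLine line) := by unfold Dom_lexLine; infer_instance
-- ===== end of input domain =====

-- B replaces A's repeated scan-ahead helper by a single forward pass with a
-- current-word accumulator: simpler decomposition, same O(n) cost.

-- ===== PORT A =====
-- while currentPosition < len(cs) and not p(cs[currentPosition]): currentPosition += 1
def findStartingColumnNumberAfterPredicate (cs : List Char) (startingPosition : Nat)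
    (isCharacterPredicate : Char → Bool) : Nat :=
  if h : startingPosition < cs.length then
    if isCharacterPredicate cs[startingPosition] then startingPosition
    else findStartingColumnNumberAfterPredicate cs (startingPosition + 1) isCharacterPredicate
  else startingPosition
termination_by cs.length - startingPosition

-- the find helper never moves backwards (used by the loop's termination proof)
theorem fscn_ge (cs : List Char) (pos : Nat) (p : Char → Bool) :
    pos ≤ findStartingColumnNumberAfterPredicate cs pos p := by
  unfold findStartingColumnNumberAfterPredicate
  split
  · split
    · exact le_refl _
    · exact Nat.le_of_succ_le (fscn_ge cs (pos + 1) p)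
  · exact le_refl _
termination_by cs.length - pos

-- if the predicate fails at pos (and pos is in range) the helper advances strictly
theorem fscn_gt (cs : List Char) (pos : Nat) (p : Char → Bool) (h : pos < cs.length)
    (hp : p cs[pos] = false) : pos < findStartingColumnNumberAfterPredicate cs pos p := by
  unfold findStartingColumnNumberAfterPredicate
  rw [dif_pos h, if_neg (by simp [hp])]
  exact Nat.lt_of_lt_of_le (Nat.lt_succ_self pos) (fscn_ge cs (pos + 1) p)

-- the while-loop body of lexLine; recursion position strictly advances
def lexLineLoop (cs : List Char) (wordStartingPosition : Nat) : List (Int × String) :=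
  if h : wordStartingPosition < cs.length then
    let nextWhitespaceStartingPosition :=
      findStartingColumnNumberAfterPredicate cs wordStartingPosition
        (fun c => PySem.Chars.isspace c)
    let word := String.ofList ((cs.drop wordStartingPosition).take
      (nextWhitespaceStartingPosition - wordStartingPosition))   -- cs[a:b], 0 ≤ a ≤ b
    ((wordStartingPosition : Int), word) ::
      lexLineLoop cs
        (findStartingColumnNumberAfterPredicate cs nextWhitespaceStartingPosition
          (fun c => !PySem.Chars.isspace c))
  else []
termination_by cs.length - wordStartingPosition
decreasing_by
  have hnext : wordStartingPosition <
      findStartingColumnNumberAfterPredicate cs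
        (findStartingColumnNumberAfterPredicate cs wordStartingPosition
          (fun c => PySem.Chars.isspace c)) (fun c => !PySem.Chars.isspace c) := by
    by_cases hs : PySem.Chars.isspace cs[wordStartingPosition] = true
    · have hstop : findStartingColumnNumberAfterPredicate cs wordStartingPosition
          (fun c => PySem.Chars.isspace c) = wordStartingPosition := by
        unfold findStartingColumnNumberAfterPredicate
        rw [dif_pos h, if_pos hs]
      rw [hstop]
      exact fscn_gt cs wordStartingPosition (fun c => !PySem.Chars.isspace c) h (by simp [hs])
    · have h1 : wordStartingPosition < findStartingColumnNumberAfterPredicate cs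
          wordStartingPosition (fun c => PySem.Chars.isspace c) :=
        fscn_gt cs wordStartingPosition (fun c => PySem.Chars.isspace c) h
          (by simpa using hs)
      exact Nat.lt_of_lt_of_le h1 (fscn_ge cs _ _)
  omega

def lexLine (line : String) : List (Int × String) :=
  lexLineLoop line.toList
    (findStartingColumnNumberAfterPredicate line.toList 0 (fun c => !PySem.Chars.isspace c))

-- ===== PORT B =====
def lexLineAltLoop (t : List Char) (i : Nat) (start : Option Nat) (buf : List Char) :
    List (Int × String) :=
  match t with
  | [] =>
    match start with
    | none => []
    | some s => [((s : Int), String.ofList buf.reverse)]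
  | c :: rest =>
    if PySem.Chars.isspace c then
      match start with
      | none => lexLineAltLoop rest (i + 1) none buf
      | some s => ((s : Int), String.ofList buf.reverse) :: lexLineAltLoop rest (i + 1) none []
    else
      match start with
      | none => lexLineAltLoop rest (i + 1) (some i) [c]
      | some s => lexLineAltLoop rest (i + 1) (some s) (c :: buf)

def lexLine_alt (line : String) : List (Int × String) :=
  lexLineAltLoop line.toList 0 none []

-- ===== PRECONDITION & SPEC =====
def Spec_lexLine (line : String) (out : List (Int × String)) : Prop := out = lexLine_alt line
instance (line : String) (out : List (Int × String)) : Decidable (Spec_lexLine line out) := by unfold Spec_lexLine; infer_instance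

-- ===== CLAIM (what is proved, stated in full; the proofs are below) =====
def Claim_equal_lexLine : Prop := ∀ (line : String), Dom_lexLine line → Spec_lexLine line (lexLine line)

-- ===== LEMMAS AND PROOFS =====

-- common reference tokenizer: skip a space, or emit the maximal nonspace run
def pvTok (t : List Char) (i : Nat) : List (Int × String) :=
  match t with
  | [] => []
  | c :: rest =>
    if PySem.Chars.isspace c then pvTok rest (i + 1)
    else ((i : Int), String.ofList (c :: rest.takeWhile (fun d => !PySem.Chars.isspace d))) ::
      pvTok (rest.dropWhile (fun d => !PySem.Chars.isspace d))
        (i + 1 + (rest.takeWhile (fun d => !PySem.Chars.isspace d)).length)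
termination_by t.length
decreasing_by
  all_goals
    have := List.length_dropWhile_le (fun d => !PySem.Chars.isspace d) rest
    simp only [List.length_cons]
    omega

theorem drop_len_takeWhile (l : List Char) (p : Char → Bool) :
    l.drop (l.takeWhile p).length = l.dropWhile p := by
  induction l with
  | nil => rfl
  | cons c r ih => by_cases h : p c <;> simp [h, ih]

theorem take_len_takeWhile (l : List Char) (p : Char → Bool) :
    l.take (l.takeWhile p).length = l.takeWhile p := by
  induction l with
  | nil => rfl
  | cons c r ih => by_cases h : p c <;> simp [h, ih]

-- the find helper counts the failing prefix from pos
theorem fscn_eq (cs : List Char) (pos : Nat) (p : Char → Bool) :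
    findStartingColumnNumberAfterPredicate cs pos p =
      pos + ((cs.drop pos).takeWhile (fun c => !p c)).length := by
  unfold findStartingColumnNumberAfterPredicate
  by_cases h : pos < cs.length
  · rw [dif_pos h, List.drop_eq_getElem_cons h]
    by_cases hp : p cs[pos]
    · rw [if_pos hp]; simp [hp]
    · have hb : p cs[pos] = false := by simpa using hp
      rw [if_neg hp, fscn_eq cs (pos + 1) p]
      simp only [List.takeWhile_cons, hb, Bool.not_false, reduceIte, List.length_cons]
      omega
  · rw [dif_neg h, List.drop_eq_nil_of_le (by omega)]; simp
termination_by cs.length - pos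

theorem fscn_le (cs : List Char) (pos : Nat) (p : Char → Bool) (h : pos ≤ cs.length) :
    findStartingColumnNumberAfterPredicate cs pos p ≤ cs.length := by
  rw [fscn_eq]
  have h1 := List.IsPrefix.length_le (List.takeWhile_prefix (l := cs.drop pos) (fun c => !p c))
  have h2 : (cs.drop pos).length = cs.length - pos := List.length_drop ..
  omega

-- where the helper stops (inside the list) the predicate holds
theorem fscn_stop (cs : List Char) (pos : Nat) (p : Char → Bool) (d : Char)
    (h : findStartingColumnNumberAfterPredicate cs pos p < cs.length) :
    p (cs.getD (findStartingColumnNumberAfterPredicate cs pos p) d) = true := by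
  by_cases hlt : pos < cs.length
  · by_cases hp : p cs[pos]
    · have hs : findStartingColumnNumberAfterPredicate cs pos p = pos := by
        unfold findStartingColumnNumberAfterPredicate; rw [dif_pos hlt, if_pos hp]
      rw [hs, List.getD_eq_getElem cs d hlt]; exact hp
    · have hs : findStartingColumnNumberAfterPredicate cs pos p =
          findStartingColumnNumberAfterPredicate cs (pos + 1) p := by
        conv_lhs => rw [findStartingColumnNumberAfterPredicate]
        rw [dif_pos hlt, if_neg hp]
      rw [hs] at h ⊢
      exact fscn_stop cs (pos + 1) p d h
  · exfalso
    have hs : findStartingColumnNumberAfterPredicate cs pos p = pos := by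
      unfold findStartingColumnNumberAfterPredicate; rw [dif_neg hlt]
    omega
termination_by cs.length - pos

-- B's loop while inside a word: flush the pending word, continue after it
theorem altLoop_word (t : List Char) (i s : Nat) (buf : List Char) :
    lexLineAltLoop t i (some s) buf =
      ((s : Int), String.ofList (buf.reverse ++ t.takeWhile (fun c => !PySem.Chars.isspace c))) ::
        lexLineAltLoop (t.dropWhile (fun c => !PySem.Chars.isspace c))
          (i + (t.takeWhile (fun c => !PySem.Chars.isspace c)).length) none [] := by
  induction t generalizing i s buf with
  | nil => simp [lexLineAltLoop]
  | cons c rest ih =>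
    by_cases hc : PySem.Chars.isspace c
    · simp [lexLineAltLoop, hc]
    · simp [lexLineAltLoop, hc, ih, Nat.add_assoc, Nat.add_comm 1]

-- B's loop outside a word is the reference tokenizer
theorem altLoop_none (t : List Char) (i : Nat) : lexLineAltLoop t i none [] = pvTok t i := by
  match t with
  | [] => simp [lexLineAltLoop, pvTok]
  | c :: rest =>
    by_cases hc : PySem.Chars.isspace c
    · have := altLoop_none rest (i + 1)
      simp [lexLineAltLoop, pvTok, hc, this]
    · have h1 := altLoop_word rest (i + 1) i [c]
      have h2 := altLoop_none (rest.dropWhile (fun d => !PySem.Chars.isspace d))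
        (i + 1 + (rest.takeWhile (fun d => !PySem.Chars.isspace d)).length)
      have h0 : lexLineAltLoop (c :: rest) i none [] =
          lexLineAltLoop rest (i + 1) (some i) [c] := by simp [lexLineAltLoop, hc]
      rw [h0, h1, h2]
      simp [pvTok, hc, Nat.add_assoc]
termination_by t.length
decreasing_by
  all_goals
    have := List.length_dropWhile_le (fun d => !PySem.Chars.isspace d) rest
    simp only [List.length_cons]
    omega

-- skipping the leading whitespace first does not change the tokenizer
theorem pvTok_skip (t : List Char) (i : Nat) :
    pvTok t i = pvTok (t.dropWhile PySem.Chars.isspace)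
      (i + (t.takeWhile PySem.Chars.isspace).length) := by
  induction t generalizing i with
  | nil => rfl
  | cons c rest ih =>
    by_cases hc : PySem.Chars.isspace c
    · simp only [pvTok, hc, reduceIte, List.dropWhile_cons, List.takeWhile_cons]
      rw [ih (i + 1)]
      simp [Nat.add_assoc, Nat.add_comm 1]
    · simp [pvTok, hc]

-- A's loop, entered at a position that is not inside leading whitespace,
-- is the reference tokenizer on the remaining suffix
theorem loopA_eq (cs : List Char) (ws : Nat) (hle : ws ≤ cs.length)
    (hinv : ws = cs.length ∨ PySem.Chars.isspace (cs.getD ws ' ') = false) :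
    lexLineLoop cs ws = pvTok (cs.drop ws) ws := by
  by_cases h : ws < cs.length
  · have hs : PySem.Chars.isspace cs[ws] = false := by
      rcases hinv with h' | h'
      · omega
      · rwa [List.getD_eq_getElem cs ' ' h] at h'
    have hdrop : cs.drop ws = cs[ws] :: cs.drop (ws + 1) := List.drop_eq_getElem_cons h
    have hnw : findStartingColumnNumberAfterPredicate cs ws (fun c => PySem.Chars.isspace c) =
        ws + 1 + ((cs.drop (ws + 1)).takeWhile (fun d => !PySem.Chars.isspace d)).length := by
      rw [fscn_eq, hdrop]
      simp only [List.takeWhile_cons, hs, Bool.not_false, reduceIte, List.length_cons]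
      omega
    set k := ((cs.drop (ws + 1)).takeWhile (fun d => !PySem.Chars.isspace d)).length with hk
    set nw := findStartingColumnNumberAfterPredicate cs ws (fun c => PySem.Chars.isspace c) with hnwdef
    set nxt := findStartingColumnNumberAfterPredicate cs nw (fun c => !PySem.Chars.isspace c)
      with hnxtdef
    have hword : (cs.drop ws).take (nw - ws) =
        cs[ws] :: (cs.drop (ws + 1)).takeWhile (fun d => !PySem.Chars.isspace d) := by
      have : nw - ws = ((cs.drop ws).takeWhile (fun d => !PySem.Chars.isspace d)).length := by
        rw [hnwdef, fscn_eq]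
        simp
      rw [this, take_len_takeWhile, hdrop, List.takeWhile_cons]
      simp [hs]
    have hnwle : nw ≤ cs.length := fscn_le cs ws _ (by omega)
    have hnxt : nxt = nw + ((cs.drop nw).takeWhile PySem.Chars.isspace).length := by
      rw [hnxtdef, fscn_eq]
      congr 1
      simp
    have hnxtle : nxt ≤ cs.length := fscn_le cs nw _ hnwle
    have hinv' : nxt = cs.length ∨ PySem.Chars.isspace (cs.getD nxt ' ') = false := by
      by_cases hx : nxt < cs.length
      · right
        have := fscn_stop cs nw (fun c => !PySem.Chars.isspace c) ' ' (by rwa [← hnxtdef])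
        simpa using this
      · left; omega
    have hrec : lexLineLoop cs nxt = pvTok (cs.drop nxt) nxt :=
      loopA_eq cs nxt hnxtle hinv'
    have hdropnxt : (cs.drop nw).dropWhile PySem.Chars.isspace = cs.drop nxt := by
      rw [← drop_len_takeWhile, List.drop_drop, hnxt, Nat.add_comm]
    have hdropnw : (cs.drop (ws + 1)).dropWhile (fun d => !PySem.Chars.isspace d) =
        cs.drop nw := by
      rw [← drop_len_takeWhile, List.drop_drop, ← hk, hnw, Nat.add_comm (ws + 1) k]
    -- unfold one step of A's loop and of pvTok and match them up
    rw [lexLineLoop, dif_pos h]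
    show ((ws : Int), String.ofList ((cs.drop ws).take (nw - ws))) :: lexLineLoop cs nxt =
      pvTok (cs.drop ws) ws
    rw [hword, hdrop]
    simp only [pvTok, hs, Bool.false_eq_true, reduceIte]
    congr 1
    rw [hrec, hdropnw, ← hnw, pvTok_skip (cs.drop nw) nw, hdropnxt, ← hnxt]
  · have hws : ws = cs.length := by omega
    rw [lexLineLoop, dif_neg h, List.drop_eq_nil_of_le (by omega)]
    simp [pvTok]
termination_by cs.length - ws
decreasing_by
  have h2 := fscn_ge cs
    (findStartingColumnNumberAfterPredicate cs ws fun c => PySem.Chars.isspace c)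
    (fun c => !PySem.Chars.isspace c)
  omega

-- ===== VERDICT (by name: the statement is the Claim_ definition above) =====
theorem lexLine_spec : Claim_equal_lexLine := by
  intro line _
  unfold Spec_lexLine lexLine lexLine_alt
  set cs := line.toList with hcs
  have hs0 : findStartingColumnNumberAfterPredicate cs 0 (fun c => !PySem.Chars.isspace c) =
      (cs.takeWhile PySem.Chars.isspace).length := by
    rw [fscn_eq]
    simp
  have hle : findStartingColumnNumberAfterPredicate cs 0 (fun c => !PySem.Chars.isspace c) ≤
      cs.length := fscn_le cs 0 _ (by omega)
  have hinv : findStartingColumnNumberAfterPredicate cs 0 (fun c => !PySem.Chars.isspace c) =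
      cs.length ∨ PySem.Chars.isspace
        (cs.getD (findStartingColumnNumberAfterPredicate cs 0
          (fun c => !PySem.Chars.isspace c)) ' ') = false := by
    by_cases hx : findStartingColumnNumberAfterPredicate cs 0
        (fun c => !PySem.Chars.isspace c) < cs.length
    · right
      have := fscn_stop cs 0 (fun c => !PySem.Chars.isspace c) ' ' hx
      simpa using this
    · left; omega
  rw [loopA_eq cs _ hle hinv, altLoop_none, hs0, drop_len_takeWhile]
  have := pvTok_skip cs 0
  rw [Nat.zero_add] at this
  exact this.symm
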